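-- pv_equiv track=rewrite | github.com/miczho/competitive-coding | kick-start-21-c-1.py | smallerStrs
-- ===== SOURCE A (Python) =====
-- def smallerStrs(n, k, s):
--     MOD = 10 ** 9 + 7
--     ans = 0
--     power = [1]
--     for i in range(n):
--         power.append((k * power[i]) % (MOD))
--
--     def lt(word):
--         res = 0
--         m = len(word)
--
--         for i in range(m):
--             res += (ord(word[i]) - ord('a')) * power[m - i - 1]
--             res %= MOD
--
--         return res
--
--     for i in range(n//2 - 1, -1, -1):
--         if s[i] > s[n-i-1]:
--             return lt(s[:(n+1)//2])
--         elif s[i] < s[n-i-1]: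
--             return (lt(s[:(n+1)//2]) + 1) % MOD
--     return lt(s[:(n+1)//2])
-- ===== SOURCE B (Python) =====
-- def smallerStrs(n, k, s):
--     MOD = 10 ** 9 + 7
--     rev = s[(n + 1) // 2:n][::-1]
--     val = 0
--     less = False
--     for i, a in enumerate(s[:(n + 1) // 2]):
--         val = (val * k + ord(a) - ord('a')) % MOD
--         if i < len(rev) and a != rev[i]:
--             less = a < rev[i]
--     return (val + 1) % MOD if less else val
-- ===== Notes on version B (the rewrite author's own statement) =====
-- stated objective: simpler
-- what changed: A runs three staged loops (build a length-(n+1) k-powers list, an indexed positional base-k sum over the half, then a separate middle-outward early-return mirror-pair scan); B is one forward pass over the half carrying a (value, flag) accumulator: Horner value per step plus a last-mismatch-wins comparison of each half character against the reversed second half — the power list, the positional sum and the early-return scan all disappear (measured ~1.5x faster at the largest size: no power list is materialized).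
-- outside the precondition, e.g. on smallerStrs(8, 2, 'zbaaab'): A returns 205, B returns 204
import Mathlib
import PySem

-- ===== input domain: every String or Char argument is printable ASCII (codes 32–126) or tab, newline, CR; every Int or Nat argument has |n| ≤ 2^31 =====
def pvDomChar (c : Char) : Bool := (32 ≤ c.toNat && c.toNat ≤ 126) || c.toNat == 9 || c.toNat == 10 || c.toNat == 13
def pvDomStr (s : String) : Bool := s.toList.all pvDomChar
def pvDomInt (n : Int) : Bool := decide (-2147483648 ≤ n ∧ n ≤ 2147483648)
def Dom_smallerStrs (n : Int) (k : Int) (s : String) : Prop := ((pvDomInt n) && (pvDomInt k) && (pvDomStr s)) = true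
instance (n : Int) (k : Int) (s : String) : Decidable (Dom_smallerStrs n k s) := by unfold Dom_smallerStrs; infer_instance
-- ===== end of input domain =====

-- B fuses A's three staged loops (power table, indexed base-k sum, middle-outward early-return
-- mirror scan) into ONE forward pass carrying a (value, flag) accumulator: Horner value plus a
-- last-mismatch-wins comparison against the reversed second half; objective: simpler (and the
-- timing run measured it ~1.5x faster at the largest size: no power list is materialized).


-- ===== PORT A =====
-- the early-return mirror-pair for-loop of A: some false = 's[i] > s[n-i-1]' branch,
-- some true = 's[i] < s[n-i-1]' branch, none = loop fell through
def pvScanA (cs : List Char) (n : Int) : List Int → Option Bool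
  | [] => none
  | i :: rest =>
      let a := PySem.List.pyGetD cs i ' '
      let b := PySem.List.pyGetD cs (n - i - 1) ' '
      if a > b then some false
      else if a < b then some true
      else pvScanA cs n rest

def smallerStrs (n : Int) (k : Int) (s : String) : Int :=
  let MOD : Int := 10 ^ 9 + 7
  let power : List Int := (PySem.List.pyRange 0 n 1).foldl
      (fun acc i => acc ++ [PySem.Int.mod (k * PySem.List.pyGetD acc i 0) MOD]) [1]
  let lt : List Char → Int := fun word =>
    let m : Int := (word.length : Int)
    (PySem.List.pyRange 0 m 1).foldl
      (fun res i => PySem.Int.mod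
          (res + (((PySem.List.pyGetD word i ' ').toNat : Int) - 97) * PySem.List.pyGetD power (m - i - 1) 0) MOD) 0
  let cs := s.toList
  let halfw := PySem.List.slice cs none (some (PySem.Int.floordiv (n + 1) 2))
  match pvScanA cs n (PySem.List.pyRange (PySem.Int.floordiv n 2 - 1) (-1) (-1)) with
  | some false => lt halfw
  | some true => PySem.Int.mod (lt halfw + 1) MOD
  | none => lt halfw

-- ===== PORT B =====
-- single forward pass: state = (Horner value so far, last-mismatch flag so far)
def smallerStrs_alt (n : Int) (k : Int) (s : String) : Int :=
  let MOD : Int := 10 ^ 9 + 7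
  let cs := s.toList
  let rev := (PySem.List.slice cs (some (PySem.Int.floordiv (n + 1) 2)) (some n)).reverse
  let st := (PySem.List.enumerate (PySem.List.slice cs none (some (PySem.Int.floordiv (n + 1) 2)))).foldl
      (fun (st : Int × Bool) p =>
        (PySem.Int.mod (st.1 * k + ((p.2.toNat : Int) - 97)) MOD,
         if p.1 < (rev.length : Int) ∧ p.2 ≠ PySem.List.pyGetD rev p.1 ' '
         then decide (p.2 < PySem.List.pyGetD rev p.1 ' ') else st.2))
      (0, false)
  if st.2 then PySem.Int.mod (st.1 + 1) MOD else st.1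

-- ===== PRECONDITION & SPEC =====
-- Pre_ admits exactly the inputs where A returns normally and its value is the specified one:
-- the natural domain 0 ≤ n ≤ len(s) (n is s's length parameter), plus all negative n on which A
-- still returns (the end-truncated half slice has length ≤ 1; for shorter-still slices A raises
-- IndexError on its one-entry power table).  Excluded although A sometimes returns there:
-- n > len(s), where A's mirror scan indexes past the end of s and raises IndexError unless an
-- in-range mirror mismatch happens to return early with a value computed from truncated slices.
def Pre_smallerStrs (n : Int) (k : Int) (s : String) : Prop :=
  (0 ≤ n ∧ n ≤ (s.toList.length : Int)) ∨ n = -1 ∨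
    (n ≤ -2 ∧ (s.toList.length : Int) + PySem.Int.floordiv (n + 1) 2 ≤ 1)
instance (n : Int) (k : Int) (s : String) : Decidable (Pre_smallerStrs n k s) := by
  unfold Pre_smallerStrs; infer_instance

def pvWitness_smallerStrs : Int × Int × String := (3, 2, "aba")

def Spec_smallerStrs (n : Int) (k : Int) (s : String) (out : Int) : Prop := out = smallerStrs_alt n k s
instance (n : Int) (k : Int) (s : String) (out : Int) : Decidable (Spec_smallerStrs n k s out) := by unfold Spec_smallerStrs; infer_instance

-- ===== CLAIM (what is proved, stated in full; the proofs are below) =====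
def Claim_equal_smallerStrs : Prop := ∀ (n : Int) (k : Int) (s : String), Dom_smallerStrs n k s → Pre_smallerStrs n k s → Spec_smallerStrs n k s (smallerStrs n k s)

-- ===== LEMMAS AND PROOFS =====

theorem pv_mul_mod_mod (M b c : Int) : (b * (c % M)) % M = (b * c) % M := by
  conv_rhs => rw [Int.mul_emod, ← Int.emod_emod_of_dvd c (dvd_refl M), ← Int.mul_emod]

theorem pv_mod_add_mul_mod (M a b c : Int) :
    (a % M + b * (c % M)) % M = (a + b * c) % M := by
  conv_lhs => rw [Int.add_emod, pv_mul_mod_mod]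
  rw [← Int.add_emod, Int.emod_add_emod]

theorem pv_power_spec (k M : Int) (hM : 1 < M) (n' : Nat) :
    (PySem.List.pyRange 0 (n' : Int) 1).foldl
      (fun acc i => acc ++ [PySem.Int.mod (k * PySem.List.pyGetD acc i 0) M]) [1]
    = (List.range (n' + 1)).map (fun j => k ^ j % M) := by
  induction n' with
  | zero =>
      simp [List.range_succ, Int.emod_eq_of_lt (by omega) hM]
  | succ m ih =>
      rw [show ((m+1 : Nat) : Int) = (m : Int) + 1 by push_cast; ring,
          PySem.List.pyRange_one_succ_right (by positivity), List.foldl_append, ih]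
      simp only [List.foldl_cons, List.foldl_nil]
      rw [PySem.List.pyGetD_natCast, PySem.List.getD_map_range _ _ _ _ (by omega)]
      conv_rhs => rw [List.range_succ]
      rw [List.map_append]
      congr 1
      simp only [List.map_cons, List.map_nil]
      rw [PySem.Int.mod_eq_emod_of_pos (by omega), pv_mul_mod_mod, ← pow_succ']

def pvD (c : Char) : Int := (c.toNat : Int) - 97

def pvSum (k : Int) (w : List Char) : Int :=
  ∑ i ∈ Finset.range w.length, pvD (w.getD i ' ') * k ^ (w.length - 1 - i)

theorem pv_lt_aux (k M : Int) (hM : 1 < M) (n' : Nat) (w : List Char) (hw : w.length ≤ n')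
    (j : Nat) (hj : j ≤ w.length) :
    (PySem.List.pyRange 0 (j : Int) 1).foldl
      (fun res i => PySem.Int.mod
          (res + (((PySem.List.pyGetD w i ' ').toNat : Int) - 97) *
            PySem.List.pyGetD ((List.range (n' + 1)).map (fun e => k ^ e % M)) (((w.length : Nat) : Int) - i - 1) 0) M) 0
    = (∑ i ∈ Finset.range j, pvD (w.getD i ' ') * k ^ (w.length - 1 - i)) % M := by
  induction j with
  | zero => simp
  | succ m ih =>
      rw [show ((m+1 : Nat) : Int) = (m : Int) + 1 by push_cast; ring,
          PySem.List.pyRange_one_succ_right (by positivity), List.foldl_append,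
          ih (by omega)]
      simp only [List.foldl_cons, List.foldl_nil]
      rw [PySem.List.pyGetD_natCast,
          show ((w.length : Nat) : Int) - (m : Int) - 1 = ((w.length - 1 - m : Nat) : Int) by omega,
          PySem.List.pyGetD_natCast, PySem.List.getD_map_range _ _ _ _ (by omega),
          PySem.Int.mod_eq_emod_of_pos (by omega), pv_mod_add_mul_mod,
          Finset.sum_range_succ]
      rfl

theorem pv_lt_spec (k M : Int) (hM : 1 < M) (n' : Nat) (w : List Char) (hw : w.length ≤ n') :
    (PySem.List.pyRange 0 ((w.length : Nat) : Int) 1).foldl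
      (fun res i => PySem.Int.mod
          (res + (((PySem.List.pyGetD w i ' ').toNat : Int) - 97) *
            PySem.List.pyGetD ((List.range (n' + 1)).map (fun e => k ^ e % M)) (((w.length : Nat) : Int) - i - 1) 0) M) 0
    = pvSum k w % M :=
  pv_lt_aux k M hM n' w hw w.length le_rfl

theorem pv_horner_aux (k M : Int) (hM : 0 < M) (w : List Char) :
    ∀ v : Int, w.foldl (fun v c => PySem.Int.mod (v * k + ((c.toNat : Int) - 97)) M) (v % M)
      = (w.foldl (fun v c => v * k + pvD c) v) % M := by
  induction w with
  | nil => intro v; simp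
  | cons c w ih =>
      intro v
      simp only [List.foldl_cons]
      rw [PySem.Int.mod_eq_emod_of_pos (by omega),
          show (v % M * k + ((c.toNat : Int) - 97)) % M
             = (v * k + pvD c) % M by
            conv_lhs => rw [Int.add_emod, mul_comm, pv_mul_mod_mod, mul_comm]
            rw [← Int.add_emod]; rfl,
          ih]

theorem pv_horner_mod (k M : Int) (hM : 0 < M) (w : List Char) :
    w.foldl (fun v c => PySem.Int.mod (v * k + ((c.toNat : Int) - 97)) M) 0
    = (w.foldl (fun v c => v * k + pvD c) 0) % M := by
  rw [show (0 : Int) = 0 % M by simp]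
  rw [pv_horner_aux k M hM w 0, Int.zero_emod]

theorem pv_horner_eq_sum (k : Int) (w : List Char) :
    w.foldl (fun v c => v * k + pvD c) 0 = pvSum k w := by
  induction w using List.reverseRecOn with
  | nil => simp [pvSum]
  | append_singleton w c ih =>
      rw [List.foldl_append, List.foldl_cons, List.foldl_nil, ih]
      unfold pvSum
      rw [List.length_append, List.length_singleton, Finset.sum_range_succ]
      have h1 : ∀ i ∈ Finset.range w.length,
          pvD ((w ++ [c]).getD i ' ') * k ^ (w.length + 1 - 1 - i)
          = (pvD (w.getD i ' ') * k ^ (w.length - 1 - i)) * k := by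
        intro i hi
        rw [Finset.mem_range] at hi
        rw [List.getD_append _ _ _ _ hi, mul_assoc, ← pow_succ,
            show w.length + 1 - 1 - i = w.length - 1 - i + 1 by omega]
      rw [Finset.sum_congr rfl h1, ← Finset.sum_mul]
      have h2 : (w ++ [c]).getD w.length ' ' = c := by
        simp
      rw [h2]
      simp [mul_comm]

-- A's middle-outward scan as a first-difference three-way comparison of two explicit lists
def pvCmp3 : List Char → List Char → Option Bool
  | x :: xs, y :: ys =>
      if x > y then some false
      else if x < y then some true
      else pvCmp3 xs ys
  | _, _ => none

def pvXl (cs : List Char) (c : Nat) : List Char :=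
  (List.range c).map (fun j : Nat => PySem.List.pyGetD cs ((c : Int) - 1 - (j : Int)) ' ')

def pvYl (cs : List Char) (a : Int) (c : Nat) : List Char :=
  (List.range c).map (fun j : Nat => PySem.List.pyGetD cs (a + (j : Int)) ' ')

theorem pvXl_succ (cs : List Char) (m : Nat) :
    pvXl cs (m + 1) = PySem.List.pyGetD cs (m : Int) ' ' :: pvXl cs m := by
  unfold pvXl
  rw [List.range_succ_eq_map, List.map_cons, List.map_map]
  refine congrArg₂ _ (by norm_num) (List.map_congr_left ?_)
  intro j hj
  simp only [Function.comp_apply]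
  congr 1
  push_cast
  ring

theorem pvYl_succ (cs : List Char) (a : Int) (m : Nat) :
    pvYl cs a (m + 1) = PySem.List.pyGetD cs a ' ' :: pvYl cs (a + 1) m := by
  unfold pvYl
  rw [List.range_succ_eq_map, List.map_cons, List.map_map]
  refine congrArg₂ _ (by norm_num) (List.map_congr_left ?_)
  intro j hj
  simp only [Function.comp_apply]
  congr 1
  push_cast
  ring

theorem pv_scan_eq_cmp3 (cs : List Char) (c : Nat) : ∀ n : Int,
    pvScanA cs n (PySem.List.pyRange ((c : Int) - 1) (-1) (-1))
    = pvCmp3 (pvXl cs c) (pvYl cs (n - (c : Int)) c) := by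
  induction c with
  | zero =>
      intro n
      rw [PySem.List.pyRange_neg_one_eq_nil (by omega)]
      simp [pvScanA, pvXl, pvYl, pvCmp3]
  | succ m ih =>
      intro n
      rw [show ((m+1 : Nat) : Int) - 1 = (m : Int) by push_cast; ring,
          PySem.List.pyRange_neg_one_cons (by omega),
          pvXl_succ, pvYl_succ, pvScanA, pvCmp3]
      rw [show n - ((m + 1 : Nat) : Int) = n - (m : Int) - 1 by push_cast; ring,
          show n - (m : Int) - 1 + 1 = n - (m : Int) by ring, ih n]

theorem pvXl_eq (cs : List Char) (c : Nat) (hc : c ≤ cs.length) :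
    pvXl cs c = (cs.take c).reverse := by
  apply List.ext_getElem
  · simp [pvXl, hc]
  · intro j h1 h2
    simp only [pvXl, List.getElem_map, List.getElem_range]
    have hj : j < c := by simpa [pvXl] using h1
    rw [show ((c : Int) - 1 - ((j : Nat) : Int)) = ((c - 1 - j : Nat) : Int) by omega,
        PySem.List.pyGetD_natCast, List.getD_eq_getElem _ _ (by omega),
        List.getElem_reverse, List.getElem_take]
    congr 1
    simp at h2 ⊢
    omega

theorem pvYl_eq (cs : List Char) (a c : Nat) (hc : a + c ≤ cs.length) :
    pvYl cs (a : Int) c = (cs.drop a).take c := by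
  apply List.ext_getElem
  · simp [pvYl]; omega
  · intro j h1 h2
    simp only [pvYl, List.getElem_map, List.getElem_range]
    have hj : j < c := by simpa [pvYl] using h1
    rw [show ((a : Int) + ((j : Nat) : Int)) = ((a + j : Nat) : Int) by omega,
        PySem.List.pyGetD_natCast, List.getD_eq_getElem _ _ (by omega),
        List.getElem_take, List.getElem_drop]

-- B's flag loop, pairwise: scan two lists in step, keep the comparison at the LAST mismatch
def pvLast : List Char → List Char → Bool → Bool
  | x :: xs, y :: ys, acc => pvLast xs ys (if x ≠ y then decide (x < y) else acc)
  | _, _, acc => acc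

theorem pvLast_nil_right (xs : List Char) (acc : Bool) : pvLast xs [] acc = acc := by
  cases xs <;> rfl

-- a fold over 'enumerate half' guarded by 'i < len rev' is pvLast against the not-yet-dropped rev
theorem pv_flag_eq_pvLast (rev : List Char) (xs : List Char) : ∀ (j : Nat) (acc : Bool),
    (PySem.List.enumerate xs ((j : Nat) : Int)).foldl
      (fun fl p =>
        if p.1 < ((rev.length : Nat) : Int) ∧ p.2 ≠ PySem.List.pyGetD rev p.1 ' '
        then decide (p.2 < PySem.List.pyGetD rev p.1 ' ') else fl) acc
    = pvLast xs (rev.drop j) acc := by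
  induction xs with
  | nil => intro j acc; simp [PySem.List.enumerate_nil, pvLast]
  | cons x xs ih =>
      intro j acc
      rw [PySem.List.enumerate_cons, List.foldl_cons]
      rcases hd : rev.drop j with _ | ⟨y, rest⟩
      · have hj : rev.length ≤ j := by
          have := List.drop_eq_nil_iff.mp hd
          omega
        rw [if_neg (by push_cast; omega), pvLast_nil_right, show ((j : Nat) : Int) + 1 = ((j + 1 : Nat) : Int) by push_cast; ring,
            ih (j + 1) acc, List.drop_eq_nil_of_le (by omega), pvLast_nil_right]
      · have hj : j < rev.length := by
          by_contra hc
          rw [List.drop_eq_nil_of_le (by omega)] at hd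
          exact List.cons_ne_nil _ _ hd.symm
        have hy : PySem.List.pyGetD rev ((j : Nat) : Int) ' ' = y := by
          rw [PySem.List.pyGetD_natCast, List.getD_eq_getElem?_getD]
          have : (rev.drop j)[0]? = rev[j]? := by
            simp [List.getElem?_drop]
          rw [← this, hd]
          rfl
        have htail : rev.drop (j + 1) = rest := by
          rw [← List.tail_drop, hd]
          rfl
        rw [hy, show ((j : Nat) : Int) + 1 = ((j + 1 : Nat) : Int) by push_cast; ring,
            ih (j + 1), htail, pvLast]
        by_cases hxy : x = y
        · rw [if_neg (by simp [hxy]), if_neg (by simp [hxy])]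
        · rw [if_pos ⟨by push_cast; omega, hxy⟩, if_pos (by simp [hxy])]

theorem pvLast_take (bs : List Char) : ∀ (as : List Char) (acc : Bool),
    pvLast as bs acc = pvLast (as.take bs.length) bs acc := by
  induction bs with
  | nil => intro as acc; simp [pvLast_nil_right]
  | cons b bs ih =>
      intro as acc
      cases as with
      | nil => rfl
      | cons a as => rw [List.length_cons, List.take_succ_cons, pvLast, pvLast, ih]

theorem pvLast_append (x y : Char) : ∀ (as bs : List Char) (acc : Bool), as.length = bs.length →
    pvLast (as ++ [x]) (bs ++ [y]) acc = if x ≠ y then decide (x < y) else pvLast as bs acc := by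
  intro as
  induction as with
  | nil =>
      intro bs acc h
      have : bs = [] := by cases bs <;> simp_all
      subst this
      simp [pvLast]
  | cons a as ih =>
      intro bs acc h
      cases bs with
      | nil => simp at h
      | cons b bs =>
          rw [List.cons_append, List.cons_append, pvLast, pvLast,
              ih bs _ (by simpa using h)]

-- last-mismatch-wins over (X.reverse, Y.reverse) = first-mismatch three-way compare of (X, Y)
theorem pvLast_rev_eq_cmp3 : ∀ (X Y : List Char), X.length = Y.length →
    pvLast X.reverse Y.reverse false = decide (pvCmp3 X Y = some true) := by
  intro X
  induction X with
  | nil =>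
      intro Y h
      have : Y = [] := by cases Y <;> simp_all
      subst this
      simp [pvLast, pvCmp3]
  | cons x X ih =>
      intro Y h
      cases Y with
      | nil => simp at h
      | cons y Y =>
          have hXY : X.length = Y.length := by simpa using h
          rw [List.reverse_cons, List.reverse_cons,
              pvLast_append x y _ _ _ (by simp [hXY]), pvCmp3]
          rcases lt_trichotomy x y with hxy | hxy | hxy
          · rw [if_pos (by exact hxy.ne), if_neg (by exact not_lt_of_gt hxy), if_pos hxy]
            simp [hxy]
          · subst hxy
            rw [if_neg (by simp), if_neg (lt_irrefl x), if_neg (lt_irrefl x)]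
            exact ih Y (by simpa using h)
          · rw [if_pos (by exact hxy.ne'), if_pos hxy]
            simp [not_lt_of_gt hxy]

-- ===== VERDICT (by name: the statement is the Claim_ definition above) =====
theorem smallerStrs_spec : Claim_equal_smallerStrs := by
  unfold Claim_equal_smallerStrs
  intro n k s _ hpre
  unfold Spec_smallerStrs
  have hM : (1 : Int) < 10 ^ 9 + 7 := by norm_num
  rcases hpre with ⟨hn0, hnlen⟩ | hneg
  · -- main branch: 0 ≤ n ≤ len s
    obtain ⟨n', rfl⟩ : ∃ n' : Nat, n = (n' : Int) := ⟨n.toNat, (Int.toNat_of_nonneg hn0).symm⟩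
    have hlen : n' ≤ s.toList.length := by exact_mod_cast hnlen
    simp only [smallerStrs, smallerStrs_alt]
    rw [show PySem.Int.floordiv ((n' : Int) + 1) 2 = (((n' + 1) / 2 : Nat) : Int) by
          rw [PySem.Int.floordiv_eq_ediv_of_pos (by norm_num)]; omega,
        show PySem.Int.floordiv ((n' : Int)) 2 = ((n' / 2 : Nat) : Int) by
          rw [PySem.Int.floordiv_eq_ediv_of_pos (by norm_num)]; omega,
        PySem.List.slice_to_natCast, PySem.List.slice_natCast]
    rw [pv_power_spec k (10 ^ 9 + 7) hM n']
    set cs := s.toList with hcs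
    set h := (n' + 1) / 2 with hh
    set m := n' / 2 with hm
    set half := List.take h cs with hhalf
    have hhl : half.length = h := by
      rw [hhalf, List.length_take]; omega
    have hrevlen : (((cs.drop h).take (n' - h)).reverse).length = m := by
      rw [List.length_reverse, List.length_take, List.length_drop]; omega
    -- A's value of lt(half)
    rw [pv_lt_spec k (10 ^ 9 + 7) hM n' half (by omega)]
    -- B's fused loop is two loops
    rw [PySem.List.foldl_prod_mk
          (f := fun v (p : Int × Char) => PySem.Int.mod (v * k + ((p.2.toNat : Int) - 97)) (10 ^ 9 + 7))
          (g := fun fl (p : Int × Char) =>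
            if p.1 < (((((cs.drop h).take (n' - h)).reverse).length : Nat) : Int) ∧
                p.2 ≠ PySem.List.pyGetD (((cs.drop h).take (n' - h)).reverse) p.1 ' '
            then decide (p.2 < PySem.List.pyGetD (((cs.drop h).take (n' - h)).reverse) p.1 ' ')
            else fl)]
    -- value component: enumerate indices are unused, it is the Horner fold over half
    have hval : (PySem.List.enumerate half 0).foldl
        (fun v (p : Int × Char) => PySem.Int.mod (v * k + ((p.2.toNat : Int) - 97)) (10 ^ 9 + 7)) 0
        = pvSum k half % (10 ^ 9 + 7) := by
      have hgen : ∀ (w : List Char) (j : Int) (a : Int),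
          (PySem.List.enumerate w j).foldl
            (fun v (p : Int × Char) => PySem.Int.mod (v * k + ((p.2.toNat : Int) - 97)) (10 ^ 9 + 7)) a
          = w.foldl (fun v c => PySem.Int.mod (v * k + ((c.toNat : Int) - 97)) (10 ^ 9 + 7)) a := by
        intro w
        induction w with
        | nil => intro j a; simp [PySem.List.enumerate_nil]
        | cons c w ih => intro j a; rw [PySem.List.enumerate_cons, List.foldl_cons, List.foldl_cons, ih]
      rw [hgen, pv_horner_mod k (10 ^ 9 + 7) (by omega) half, pv_horner_eq_sum]
    -- flag component: pvLast against rev, then the three-way compare A performs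
    have hflag : (PySem.List.enumerate half 0).foldl
        (fun fl (p : Int × Char) =>
          if p.1 < (((((cs.drop h).take (n' - h)).reverse).length : Nat) : Int) ∧
              p.2 ≠ PySem.List.pyGetD (((cs.drop h).take (n' - h)).reverse) p.1 ' '
          then decide (p.2 < PySem.List.pyGetD (((cs.drop h).take (n' - h)).reverse) p.1 ' ')
          else fl) false
        = decide (pvCmp3 ((cs.take m).reverse) ((cs.drop h).take m) = some true) := by
      rw [show (0 : Int) = ((0 : Nat) : Int) by norm_num,
          pv_flag_eq_pvLast (((cs.drop h).take (n' - h)).reverse) half 0 false,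
          List.drop_zero, pvLast_take, hrevlen,
          show half.take m = cs.take m by rw [hhalf, List.take_take]; congr 1; omega,
          show (n' : Nat) - h = m by omega]
      have hX : ((cs.take m).reverse).reverse = cs.take m := List.reverse_reverse _
      rw [← hX, pvLast_rev_eq_cmp3 ((cs.take m).reverse) ((cs.drop h).take m)
            (by rw [List.length_reverse, List.length_take, List.length_take, List.length_drop]; omega),
          List.reverse_reverse]
    rw [hval, hflag]
    -- A's scan is the same three-way compare
    rw [pv_scan_eq_cmp3 cs m (n' : Int),
        show (n' : Int) - ((m : Nat) : Int) = ((h : Nat) : Int) by omega,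
        pvXl_eq cs m (by omega), pvYl_eq cs h m (by omega)]
    rcases hc : pvCmp3 ((cs.take m).reverse) ((cs.drop h).take m) with _ | b
    · simp
    · cases b
      · simp
      · simp
  · -- negative branch: n = -1, or n ≤ -2 with a half slice of length ≤ 1
    have hnneg : n < 0 := by rcases hneg with rfl | ⟨h2, _⟩ <;> omega
    simp only [smallerStrs, smallerStrs_alt]
    -- power table is [1], A's mirror scan is empty
    rw [PySem.List.pyRange_one_eq_nil (by omega), List.foldl_nil]
    have hdiv2 : PySem.Int.floordiv n 2 ≤ -1 := by
      have h1 := PySem.Int.floordiv_mul_add_mod n 2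
      have h2 := PySem.Int.mod_nonneg n (b := 2) (by omega)
      have h3 := PySem.Int.mod_lt n (b := 2) (by omega)
      omega
    rw [PySem.List.pyRange_neg_one_eq_nil (by omega)]
    set cs := s.toList with hcs
    set b' := PySem.Int.floordiv (n + 1) 2 with hb'
    have hb'facts : n ≤ b' ∧ b' ≤ 0 ∧ (n = -1 → b' = 0) ∧ (n ≤ -2 → b' ≤ -1) := by
      have h1 := PySem.Int.floordiv_mul_add_mod (n + 1) 2
      have h2 := PySem.Int.mod_nonneg (n + 1) (b := 2) (by omega)
      have h3 := PySem.Int.mod_lt (n + 1) (b := 2) (by omega)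
      omega
    -- the half slice is empty (n = -1) or has length ≤ 1, and then rev is empty
    rcases hneg with rfl | ⟨h2, hlen1⟩
    · -- n = -1 : the half slice is s[:0] = [], both loops are vacuous
      have hb0 : b' = 0 := hb'facts.2.2.1 rfl
      rw [hb0, show (0 : Int) = ((0 : Nat) : Int) by norm_num, PySem.List.slice_to_natCast,
          List.take_zero]
      simp [pvScanA, PySem.List.enumerate_nil, PySem.List.pyRange_one_eq_nil (le_refl (0 : Int))]
    · -- n ≤ -2 : rev is the empty slice s[b':n] with n ≤ b' < 0, half has ≤ 1 character
      have hb1 : b' ≤ -1 := hb'facts.2.2.2 h2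
      obtain ⟨p, hp, hpe⟩ : ∃ p : Nat, 0 < p ∧ b' = -(p : Int) := ⟨(-b').toNat, by omega, by omega⟩
      obtain ⟨q, hq, hqe⟩ : ∃ q : Nat, 0 < q ∧ n = -(q : Int) := ⟨(-n).toNat, by omega, by omega⟩
      have hrev : PySem.List.slice cs (some b') (some n) = [] := by
        apply List.eq_nil_of_length_eq_zero
        rw [PySem.List.length_slice, hpe, hqe,
            PySem.List.clampIdx_neg_natCast _ _ hp, PySem.List.clampIdx_neg_natCast _ _ hq]
        omega
      rw [hrev]
      have hwdef : PySem.List.slice cs none (some b') = cs.take (cs.length - p) := by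
        rw [hpe, PySem.List.slice_to_neg_natCast _ _ hp]
      have hwlen : (cs.take (cs.length - p)).length ≤ 1 := by
        rw [List.length_take]
        omega
      rw [hwdef]
      match hw : cs.take (cs.length - p), hwlen with
      | [], _ =>
          simp [pvScanA, PySem.List.enumerate_nil, PySem.List.pyRange_one_eq_nil (le_refl (0 : Int))]
      | [c], _ =>
          rw [show pvScanA cs n [] = none from rfl]
          rw [show (([c] : List Char).length : Int) = (0 : Int) + 1 by simp,
              PySem.List.pyRange_one_succ_right (by norm_num), PySem.List.pyRange_one_eq_nil le_rfl]
          simp only [List.nil_append, List.foldl_cons, List.foldl_nil,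
            PySem.List.enumerate_cons, PySem.List.enumerate_nil]
          set G := (if (0:Int) < ((([] : List Char).reverse.length : Nat) : Int) ∧
              c ≠ PySem.List.pyGetD ([] : List Char).reverse 0 ' '
            then decide (c < PySem.List.pyGetD ([] : List Char).reverse 0 ' ') else false) with hG
          have hGf : G = false := by rw [hG]; simp
          rw [hGf, if_neg (by simp)]
          congr 1
          rw [show ((0:Int) + 1 - 0 - 1) = ((0:Nat):Int) by norm_num, PySem.List.pyGetD_natCast]
          simp
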